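-- pv_equiv track=rewrite | github.com/tomcuel/Advent_Of_Code | AdventOfCode-2022-Python/day17/day17-1.py | can_move_right
-- ===== SOURCE A (Python) =====
-- def get_position_of_the_rock(map,rock_type : str) :
--     positions=[]
--     for i in range(len(map)):
--         for j in range(7):
--             if map[i][j] == 2 :
--                 positions.append([i,j])
--     return positions
--
-- def can_move_right(map, direction : str, current_figure : str) :
--     can_move=True
--     # to get the position of the rock, where are the points of the rock
--     positions=get_position_of_the_rock(map,current_figure)
--
--     if current_figure == "-" :
--         # if the one on the left is blocked by a 1
--         if map[positions[3][0]][positions[3][1]+1] == 1 :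
--             can_move=False
--
--     if current_figure == "+" :
--         # if the top one is blocked
--         if map[positions[0][0]][positions[0][1]+1] == 1 :
--             can_move=False
--         # if the left  one is blocked
--         if map[positions[3][0]][positions[3][1]+1] == 1 :
--             can_move=False
--         # if the bottom one is blocked
--         if map[positions[4][0]][positions[4][1]+1] == 1 :
--             can_move=False
--
--     if current_figure == "j" :
--         # if the two top one is blocked
--         if map[positions[0][0]][positions[0][1]+1] == 1 or map[positions[1][0]][positions[1][1]+1] == 1:
--             can_move=False
--         # if the bottom one, on the left is blocked
--         if map[positions[4][0]][positions[4][1]+1] == 1 :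
--             can_move=False
--
--     if current_figure == "|" :
--         for point in positions:
--             if map[point[0]][point[1]+1] == 1 :
--                 can_move=False
--
--     if current_figure == "@" :
--         # searching the two point of the left of the cube
--         if map[positions[1][0]][positions[1][1]+1] == 1 or map[positions[3][0]][positions[3][1]+1] == 1 :
--             can_move=False
--
--
--     return can_move
-- ===== SOURCE B (Python) =====
-- def can_move_right(map, direction, current_figure):
--     # One universal scan instead of A's coordinate list + per-figure fixed-index
--     # checks: every rock cell's right neighbour is inspected; for a well-formed
--     # figure the interior cells see another rock cell (2), so only the rightmost
--     # cells - exactly the ones A inspects - can clear the flag.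
--     if current_figure not in ("-", "+", "j", "|", "@"):
--         return True
--     can_move = True
--     for row in map:
--         for j in range(7):
--             if row[j] == 2 and row[j + 1] == 1:
--                 can_move = False
--     return can_move
-- ===== Notes on version B (the rewrite author's own statement) =====
-- stated objective: simpler
-- what changed: drops A's coordinate-list construction and per-figure fixed-index branches entirely: B does one uniform scan of the grid, clearing the flag whenever any rock cell (2) has a 1 to its right, which for a well-formed figure inspects exactly the rightmost cells A does because interior rock cells have a 2 to their right
-- outside the precondition, e.g. on can_move_right([[2, 1, 0, 2, 0, 0, 0], [2, 0, 0, 2, 0, 0, 0]], '>', '-'): A returns True, B returns False; on can_move_right([[2, 2, 2, 2, 2, 0, 0]], '>', '-'): A returns True, B returns True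
import Mathlib
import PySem

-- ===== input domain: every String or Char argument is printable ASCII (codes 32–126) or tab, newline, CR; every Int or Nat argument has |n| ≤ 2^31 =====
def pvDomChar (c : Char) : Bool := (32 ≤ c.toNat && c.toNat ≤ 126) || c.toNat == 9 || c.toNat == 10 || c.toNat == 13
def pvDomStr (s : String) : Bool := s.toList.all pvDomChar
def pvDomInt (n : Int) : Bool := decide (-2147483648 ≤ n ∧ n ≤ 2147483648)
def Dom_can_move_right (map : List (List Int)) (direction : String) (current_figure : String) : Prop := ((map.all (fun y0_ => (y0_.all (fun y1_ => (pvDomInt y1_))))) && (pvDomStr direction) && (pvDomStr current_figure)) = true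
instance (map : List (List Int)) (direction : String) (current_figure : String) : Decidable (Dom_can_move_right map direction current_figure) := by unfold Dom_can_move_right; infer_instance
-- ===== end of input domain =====

-- B drops A's coordinate list and per-figure fixed-index branches for one uniform
-- grid scan (any rock cell with a 1 to its right blocks); objective: simpler.

-- ===== PORT A =====
-- Python indexing map[i][j] is ported with PySem.List.pyGetD; all indices A uses are
-- nonnegative, and Pre_ keeps them in range (Python raises IndexError outside).
def get_position_of_the_rock (map : List (List Int)) (rock_type : String) : List (Int × Int) :=
  (PySem.List.pyRange 0 map.length 1).foldl (fun positions i =>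
    (PySem.List.pyRange 0 7 1).foldl (fun positions j =>
      if PySem.List.pyGetD (PySem.List.pyGetD map i []) j 0 = 2 then positions ++ [(i, j)]
      else positions) positions) []

-- map[p.1][p.2 + 1], the cell to the right of a rock point
def pvCell (map : List (List Int)) (p : Int × Int) : Int :=
  PySem.List.pyGetD (PySem.List.pyGetD map p.1 []) (p.2 + 1) 0

def can_move_right (map : List (List Int)) (direction : String) (current_figure : String) : Bool :=
  let positions := get_position_of_the_rock map current_figure
  let can_move := true
  let can_move := if current_figure = "-" then
      (if pvCell map (PySem.List.pyGetD positions 3 (0, 0)) = 1 then false else can_move)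
    else can_move
  let can_move := if current_figure = "+" then
      (let can_move := if pvCell map (PySem.List.pyGetD positions 0 (0, 0)) = 1 then false else can_move
       let can_move := if pvCell map (PySem.List.pyGetD positions 3 (0, 0)) = 1 then false else can_move
       if pvCell map (PySem.List.pyGetD positions 4 (0, 0)) = 1 then false else can_move)
    else can_move
  let can_move := if current_figure = "j" then
      (let can_move := if pvCell map (PySem.List.pyGetD positions 0 (0, 0)) = 1 ∨
                          pvCell map (PySem.List.pyGetD positions 1 (0, 0)) = 1 then false else can_move
       if pvCell map (PySem.List.pyGetD positions 4 (0, 0)) = 1 then false else can_move)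
    else can_move
  let can_move := if current_figure = "|" then
      positions.foldl (fun cm point => if pvCell map point = 1 then false else cm) can_move
    else can_move
  let can_move := if current_figure = "@" then
      (if pvCell map (PySem.List.pyGetD positions 1 (0, 0)) = 1 ∨
          pvCell map (PySem.List.pyGetD positions 3 (0, 0)) = 1 then false else can_move)
    else can_move
  can_move

-- ===== PORT B =====
-- 'if current_figure not in ("-","+","j","|","@"): return True' then the double scan
def can_move_right_alt (map : List (List Int)) (direction : String) (current_figure : String) : Bool :=
  if current_figure = "-" ∨ current_figure = "+" ∨ current_figure = "j" ∨
     current_figure = "|" ∨ current_figure = "@" then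
    map.foldl (fun can_move row =>
      (PySem.List.pyRange 0 7 1).foldl (fun can_move j =>
        if PySem.List.pyGetD row j 0 = 2 ∧ PySem.List.pyGetD row (j + 1) 0 = 1 then false
        else can_move) can_move) true
  else true

-- ===== PRECONDITION & SPEC =====
-- the rock cells of the grid, in A's row-major scan order
def pvRockCells (map : List (List Int)) : List (Int × Int) :=
  (PySem.List.pyRange 0 map.length 1).flatMap (fun i =>
    ((PySem.List.pyRange 0 7 1).filter (fun j =>
      decide (PySem.List.pyGetD (PySem.List.pyGetD map i []) j 0 = 2))).map (fun j => (i, j)))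

-- the figure's cells relative to its first (row-major) rock cell
def pvOffsets (f : String) : List (Int × Int) :=
  if f = "-" then [(0, 0), (0, 1), (0, 2), (0, 3)]
  else if f = "+" then [(0, 0), (1, -1), (1, 0), (1, 1), (2, 0)]
  else if f = "j" then [(0, 0), (1, 0), (2, -2), (2, -1), (2, 0)]
  else if f = "@" then [(0, 0), (0, 1), (1, 0), (1, 1)]
  else []

-- Pre_ excludes the inputs on which A raises IndexError (a row shorter than 7, or an
-- inspected right neighbour past its row's end) and, for the four fixed-shape figures,
-- grids whose 2-cells do not form that figure: there A's fixed-index checks inspect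
-- accidental cells, an artefact of the grid being outside the function's natural domain.
def Pre_can_move_right (map : List (List Int)) (direction : String) (current_figure : String) : Prop :=
  (∀ row ∈ map, 7 ≤ row.length) ∧
  ((current_figure = "-" ∨ current_figure = "+" ∨ current_figure = "j" ∨
    current_figure = "|" ∨ current_figure = "@") →
    ∀ p ∈ pvRockCells map, p.2 + 2 ≤ ((PySem.List.pyGetD map p.1 []).length : Int)) ∧
  ((current_figure = "-" ∨ current_figure = "+" ∨ current_figure = "j" ∨ current_figure = "@") →
    pvRockCells map = (pvOffsets current_figure).map (fun d =>
      (((pvRockCells map).headD (0, 0)).1 + d.1, ((pvRockCells map).headD (0, 0)).2 + d.2)))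
instance (map : List (List Int)) (direction : String) (current_figure : String) : Decidable (Pre_can_move_right map direction current_figure) := by unfold Pre_can_move_right; infer_instance

def pvWitness_can_move_right : List (List Int) × String × String := ([[0, 0, 2, 2, 2, 2, 0]], ">", "-")

def Spec_can_move_right (map : List (List Int)) (direction : String) (current_figure : String) (out : Bool) : Prop := out = can_move_right_alt map direction current_figure
instance (map : List (List Int)) (direction : String) (current_figure : String) (out : Bool) : Decidable (Spec_can_move_right map direction current_figure out) := by unfold Spec_can_move_right; infer_instance

-- ===== CLAIM (what is proved, stated in full; the proofs are below) =====
def Claim_equal_can_move_right : Prop := ∀ (map : List (List Int)) (direction : String) (current_figure : String), Dom_can_move_right map direction current_figure → Pre_can_move_right map direction current_figure → Spec_can_move_right map direction current_figure (can_move_right map direction current_figure)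

-- ===== LEMMAS AND PROOFS =====

-- a carried can_move flag is an all()
lemma foldl_flag {α : Type} (P : α → Prop) [DecidablePred P] (l : List α) :
    ∀ acc : Bool, l.foldl (fun cm x => if P x then false else cm) acc
      = (acc && l.all (fun x => !decide (P x))) := by
  induction l with
  | nil => simp
  | cons a t ih =>
    intro acc
    rw [List.foldl_cons, ih]
    by_cases h : P a <;> simp [h]

lemma foldl_and {α : Type} (q : α → Bool) (l : List α) :
    ∀ acc : Bool, l.foldl (fun b x => b && q x) acc = (acc && l.all q) := by
  induction l with
  | nil => simp
  | cons a t ih => intro acc; rw [List.foldl_cons, ih]; simp [Bool.and_assoc]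

-- A's nested append-loops build exactly pvRockCells
lemma pos_eq (map : List (List Int)) (fig : String) :
    get_position_of_the_rock map fig = pvRockCells map := by
  unfold get_position_of_the_rock pvRockCells
  simp only [PySem.List.foldl_append_ite, PySem.List.foldl_append_eq_flatMap, List.nil_append]

-- every rock cell holds a 2
lemma mem_rock (map : List (List Int)) (p : Int × Int) (h : p ∈ pvRockCells map) :
    PySem.List.pyGetD (PySem.List.pyGetD map p.1 []) p.2 0 = 2 := by
  simp only [pvRockCells, List.mem_flatMap, List.mem_map, List.mem_filter] at h
  obtain ⟨i, _, j, ⟨_, h2⟩, rfl⟩ := h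
  simpa using h2

lemma mem_row (map : List (List Int)) (row : List Int) :
    row ∈ map ↔ ∃ i, i ∈ PySem.List.pyRange 0 (map.length : Int) 1 ∧ PySem.List.pyGetD map i [] = row := by
  constructor
  · intro h
    obtain ⟨k, hk, rfl⟩ := List.mem_iff_getElem.mp h
    refine ⟨(k : Int), ?_, ?_⟩
    · rw [PySem.List.mem_pyRange_one]; constructor <;> [positivity; exact_mod_cast hk]
    · simp [PySem.List.pyGetD_natCast, hk]
  · rintro ⟨i, hi, rfl⟩
    rw [PySem.List.mem_pyRange_one] at hi
    have h0 : 0 ≤ i := hi.1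
    have hlen : i.toNat < map.length := by omega
    have hcast : i = ((i.toNat : Nat) : Int) := by omega
    rw [hcast, PySem.List.pyGetD_natCast, List.getD_eq_getElem _ _ hlen]
    exact List.getElem_mem _

-- B's double scan checks the right neighbour of every rock cell
lemma scan_eq_all (map : List (List Int)) :
    map.foldl (fun can_move row =>
      (PySem.List.pyRange 0 7 1).foldl (fun can_move j =>
        if PySem.List.pyGetD row j 0 = 2 ∧ PySem.List.pyGetD row (j + 1) 0 = 1 then false
        else can_move) can_move) true
    = (pvRockCells map).all (fun p => !(pvCell map p == 1)) := by
  simp only [foldl_flag, foldl_and, Bool.true_and]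
  rw [Bool.eq_iff_iff]
  simp only [List.all_eq_true, pvRockCells, pvCell, List.mem_flatMap, List.mem_map,
    List.mem_filter, Bool.not_eq_eq_eq_not, Bool.not_true, decide_eq_false_iff_not,
    not_and, beq_eq_false_iff_ne, ne_eq]
  constructor
  · rintro h p ⟨i, hi, j, ⟨hj, h2⟩, rfl⟩
    have hrow : PySem.List.pyGetD map i [] ∈ map := (mem_row map _).mpr ⟨i, hi, rfl⟩
    exact h _ hrow j hj (by simpa using h2)
  · intro h row hrow j hj h2 h1
    obtain ⟨i, hi, rfl⟩ := (mem_row map row).mp hrow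
    exact h (i, j) ⟨i, hi, j, ⟨hj, by simpa using h2⟩, rfl⟩ h1

-- value-2 facts for the figure's interior cells, read off the shape equation
lemma cell2 (map : List (List Int)) (a b : Int)
    (h : (a, b) ∈ pvRockCells map) (p : Int × Int) (hp : p.1 = a ∧ p.2 + 1 = b) :
    (pvCell map p == 1) = false := by
  have := mem_rock map (a, b) h
  have hv : pvCell map p = 2 := by
    simp only [pvCell, hp.1, hp.2]
    simpa using this
  simp [hv]

-- ===== VERDICT (by name: the statement is the Claim_ definition above) =====
theorem can_move_right_spec : Claim_equal_can_move_right := by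
  intro map direction current_figure _ hpre
  obtain ⟨-, -, hshape⟩ := hpre
  unfold Spec_can_move_right can_move_right can_move_right_alt
  rw [pos_eq]
  by_cases h1 : current_figure = "|"
  · subst h1
    simp only [String.reduceEq, reduceIte, or_true, true_or, if_true]
    rw [scan_eq_all, foldl_flag (fun point => pvCell map point = 1)]
    simp only [Bool.true_and]
    have e : (fun point => !decide (pvCell map point = 1))
        = (fun p : Int × Int => !(pvCell map p == 1)) := by
      funext p; by_cases h : pvCell map p = 1 <;> simp [h]
    rw [e]
  by_cases h2 : current_figure = "-"
  · subst h2
    have h := hshape (Or.inl rfl)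
    set a := ((pvRockCells map).headD (0, 0)).1 with ha
    set b := ((pvRockCells map).headD (0, 0)).2 with hb
    simp only [pvOffsets, String.reduceEq, reduceIte, List.map_cons, List.map_nil,
      add_zero] at h
    simp only [String.reduceEq, reduceIte, true_or, if_true]
    rw [scan_eq_all]
    have v0 := cell2 map a (b + 1) (by rw [h]; simp) (a, b) ⟨rfl, rfl⟩
    have v1 := cell2 map a (b + 2) (by rw [h]; simp) (a, b + 1) ⟨rfl, by ring⟩
    have v2 := cell2 map a (b + 3) (by rw [h]; simp) (a, b + 2) ⟨rfl, by ring⟩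
    rw [h]
    simp only [pysem, List.all_cons, List.all_nil, v0, v1, v2, Bool.not_false,
      Bool.true_and, Bool.and_true]
    by_cases c : pvCell map (a, b + 3) = 1 <;> simp [c]
  by_cases h3 : current_figure = "+"
  · subst h3
    have h := hshape (Or.inr (Or.inl rfl))
    set a := ((pvRockCells map).headD (0, 0)).1 with ha
    set b := ((pvRockCells map).headD (0, 0)).2 with hb
    simp only [pvOffsets, String.reduceEq, reduceIte, List.map_cons, List.map_nil,
      add_zero] at h
    simp only [String.reduceEq, reduceIte, true_or, or_true, if_true]
    rw [scan_eq_all]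
    have v1 := cell2 map (a + 1) b (by rw [h]; simp) (a + 1, b + -1) ⟨rfl, by ring⟩
    have v2 := cell2 map (a + 1) (b + 1) (by rw [h]; simp) (a + 1, b) ⟨rfl, rfl⟩
    rw [h]
    simp only [pysem, List.all_cons, List.all_nil, v1, v2, Bool.not_false,
      Bool.true_and, Bool.and_true]
    by_cases c0 : pvCell map (a, b) = 1 <;>
    by_cases c3 : pvCell map (a + 1, b + 1) = 1 <;>
    by_cases c4 : pvCell map (a + 2, b) = 1 <;> simp [c0, c3, c4]
  by_cases h4 : current_figure = "j"
  · subst h4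
    have h := hshape (Or.inr (Or.inr (Or.inl rfl)))
    set a := ((pvRockCells map).headD (0, 0)).1 with ha
    set b := ((pvRockCells map).headD (0, 0)).2 with hb
    simp only [pvOffsets, String.reduceEq, reduceIte, List.map_cons, List.map_nil,
      add_zero] at h
    simp only [String.reduceEq, reduceIte, true_or, or_true, if_true]
    rw [scan_eq_all]
    have v2 := cell2 map (a + 2) (b + -1) (by rw [h]; simp) (a + 2, b + -2) ⟨rfl, by ring⟩
    have v3 := cell2 map (a + 2) b (by rw [h]; simp) (a + 2, b + -1) ⟨rfl, by ring⟩
    rw [h]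
    simp only [pysem, List.all_cons, List.all_nil, v2, v3, Bool.not_false,
      Bool.true_and, Bool.and_true]
    by_cases c0 : pvCell map (a, b) = 1 <;>
    by_cases c1 : pvCell map (a + 1, b) = 1 <;>
    by_cases c4 : pvCell map (a + 2, b) = 1 <;> simp [c0, c1, c4]
  by_cases h5 : current_figure = "@"
  · subst h5
    have h := hshape (Or.inr (Or.inr (Or.inr rfl)))
    set a := ((pvRockCells map).headD (0, 0)).1 with ha
    set b := ((pvRockCells map).headD (0, 0)).2 with hb
    simp only [pvOffsets, String.reduceEq, reduceIte, List.map_cons, List.map_nil,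
      add_zero] at h
    simp only [String.reduceEq, reduceIte, or_true, if_true]
    rw [scan_eq_all]
    have v0 := cell2 map a (b + 1) (by rw [h]; simp) (a, b) ⟨rfl, rfl⟩
    have v2 := cell2 map (a + 1) (b + 1) (by rw [h]; simp) (a + 1, b) ⟨rfl, rfl⟩
    rw [h]
    simp only [pysem, List.all_cons, List.all_nil, v0, v2, Bool.not_false,
      Bool.true_and, Bool.and_true]
    by_cases c1 : pvCell map (a, b + 1) = 1 <;>
    by_cases c3 : pvCell map (a + 1, b + 1) = 1 <;> simp [c1, c3]
  · simp [h1, h2, h3, h4, h5]
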